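-- pv_equiv track=rewrite | github.com/fescofesco/CCC | CCC/Challenge 2024/level5/try_stuff.py | desks_conflict
-- ===== SOURCE A (Python) =====
-- from typing import List, Tuple, Dict, Set
--
-- def desks_conflict(pos1, pos2) -> bool:
--     # Determine if two desks conflict
--     cells1 = desk_cells(pos1)
--     cells2 = desk_cells(pos2)
--     # Check for overlap
--     if set(cells1) & set(cells2):
--         return True
--     # Check for adjacency
--     for cell1 in cells1:
--         for cell2 in cells2:
--             if abs(cell1[0] - cell2[0]) <= 1 and abs(cell1[1] - cell2[1]) <= 1:
--                 if cell1 != cell2: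
--                     return True
--     return False
--
-- def desk_cells(pos) -> List[Tuple[int, int]]:
--     orientation, i, j = pos
--     if orientation == 'H':
--         return [(i, j), (i, j + 1)]
--     else:
--         return [(i, j), (i + 1, j)]
-- ===== SOURCE B (Python) =====
-- def desks_conflict(pos1, pos2) -> bool:
--     # Closed-form bounding-box check: desks conflict iff their row and
--     # column intervals are each separated by at most 1.
--     r1a, r1b, c1a, c1b = desk_box(pos1)
--     r2a, r2b, c2a, c2b = desk_box(pos2)
--     sep_r = max(0, r1a - r2b, r2a - r1b)
--     sep_c = max(0, c1a - c2b, c2a - c1b)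
--     return sep_r <= 1 and sep_c <= 1
--
-- def desk_box(pos):
--     orientation, i, j = pos
--     if orientation == 'H':
--         return (i, i, j, j + 1)
--     else:
--         return (i, i + 1, j, j)
-- ===== Notes on version B (the rewrite author's own statement) =====
-- stated objective: simpler
-- what changed: B replaces the per-cell set intersection and nested adjacency scan with a closed-form interval-separation test on each desk's bounding box (conflict iff row and column separation are both <= 1).
import Mathlib
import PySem

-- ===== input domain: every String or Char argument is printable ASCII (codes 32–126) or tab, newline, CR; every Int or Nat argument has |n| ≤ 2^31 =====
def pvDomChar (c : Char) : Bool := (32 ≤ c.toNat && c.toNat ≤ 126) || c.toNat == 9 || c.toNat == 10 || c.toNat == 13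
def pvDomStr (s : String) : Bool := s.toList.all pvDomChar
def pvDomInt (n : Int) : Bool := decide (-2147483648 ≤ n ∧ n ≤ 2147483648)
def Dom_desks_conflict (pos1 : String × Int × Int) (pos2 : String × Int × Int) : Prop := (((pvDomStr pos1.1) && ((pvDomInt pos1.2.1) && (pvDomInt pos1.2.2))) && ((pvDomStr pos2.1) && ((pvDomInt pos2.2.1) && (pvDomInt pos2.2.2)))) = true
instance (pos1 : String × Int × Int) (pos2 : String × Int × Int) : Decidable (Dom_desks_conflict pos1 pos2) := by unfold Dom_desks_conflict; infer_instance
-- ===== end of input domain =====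

-- Header: B replaces A's per-cell set intersection + nested adjacency scan with a
-- closed-form bounding-box interval-separation test (objective: simpler).
-- ===== PORT A =====
def desk_cells (pos : String × Int × Int) : List (Int × Int) :=
  let o := pos.1; let i := pos.2.1; let j := pos.2.2
  if o == "H" then [(i, j), (i, j + 1)] else [(i, j), (i + 1, j)]

def desks_conflict (pos1 : String × Int × Int) (pos2 : String × Int × Int) : Bool :=
  let cells1 := desk_cells pos1
  let cells2 := desk_cells pos2
  -- if set(cells1) & set(cells2): return True
  if (PySem.Set.inter (PySem.Set.ofList cells1) (PySem.Set.ofList cells2)) ≠ [] then true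
  else
    -- nested for-loop with early return  ≡  any/any
    cells1.any (fun c1 => cells2.any (fun c2 =>
      ((c1.1 - c2.1).natAbs ≤ 1 && (c1.2 - c2.2).natAbs ≤ 1) && c1 != c2))

-- ===== PORT B =====
def desk_box (pos : String × Int × Int) : Int × Int × Int × Int :=
  let o := pos.1; let i := pos.2.1; let j := pos.2.2
  if o == "H" then (i, i, j, j + 1) else (i, i + 1, j, j)

def desks_conflict_alt (pos1 : String × Int × Int) (pos2 : String × Int × Int) : Bool :=
  let b1 := desk_box pos1
  let b2 := desk_box pos2
  let sepR := max 0 (max (b1.1 - b2.2.1) (b2.1 - b1.2.1))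
  let sepC := max 0 (max (b1.2.2.1 - b2.2.2.2) (b2.2.2.1 - b1.2.2.2))
  sepR ≤ 1 && sepC ≤ 1

-- ===== PRECONDITION & SPEC =====
def Spec_desks_conflict (pos1 : String × Int × Int) (pos2 : String × Int × Int) (out : Bool) : Prop := out = desks_conflict_alt pos1 pos2
instance (pos1 : String × Int × Int) (pos2 : String × Int × Int) (out : Bool) : Decidable (Spec_desks_conflict pos1 pos2 out) := by unfold Spec_desks_conflict; infer_instance

-- ===== CLAIM =====
def Claim_equal_desks_conflict : Prop := ∀ (pos1 : String × Int × Int) (pos2 : String × Int × Int), Dom_desks_conflict pos1 pos2 → Spec_desks_conflict pos1 pos2 (desks_conflict pos1 pos2)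

-- ===== LEMMAS AND PROOFS =====
theorem inter_ne_nil_iff (s t : List (Int × Int)) :
    (PySem.Set.inter (PySem.Set.ofList s) (PySem.Set.ofList t)) ≠ [] ↔ ∃ x ∈ s, x ∈ t := by
  rw [Ne, List.eq_nil_iff_forall_not_mem]
  push Not
  simp [PySem.Set.mem_inter, PySem.Set.mem_ofList]

theorem desks_conflict_eq_alt (pos1 pos2 : String × Int × Int) :
    desks_conflict pos1 pos2 = desks_conflict_alt pos1 pos2 := by
  obtain ⟨o1, i1, j1⟩ := pos1
  obtain ⟨o2, i2, j2⟩ := pos2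
  rw [Bool.eq_iff_iff]
  cases hb1 : (o1 == "H") <;> cases hb2 : (o2 == "H") <;>
    simp [desks_conflict, desks_conflict_alt, desk_cells, desk_box, hb1, hb2,
      inter_ne_nil_iff, Prod.ext_iff, or_and_right, exists_or, exists_eq_left, Prod.exists] <;>
    omega

-- ===== VERDICT =====
theorem desks_conflict_spec : Claim_equal_desks_conflict := by
  intro pos1 pos2 _
  unfold Spec_desks_conflict
  exact desks_conflict_eq_alt pos1 pos2
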